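-- pv_equiv track=rewrite | github.com/intel/he-toolkit | expr/scripts/encode.py | int_to_poly
-- ===== SOURCE A (Python) =====
-- from typing import Dict, List, Sequence, Iterable, Generator, Callable, Union
--
-- NumRep = Union[int, str]
--
-- def int_to_poly(num: NumRep, base: NumRep, numof_coeffs: NumRep) -> List[int]:
--     """Return a list of coeffs of a polynomial encoded from an integer"""
--     num, base, numof_coeffs = int(num), int(base), int(numof_coeffs)
--
--     def coeffs(pds, num):
--         for pth in pds:
--             coeff, num = divmod(num, pth)
--             yield coeff
--
--     pds = (base ** i for i in reversed(range(numof_coeffs)))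
--     poly = list(coeffs(pds, num))
--     if poly[0] >= base:
--         raise ValueError(f"Integer cannot fit in {numof_coeffs} slot coeffs: {poly}")
--     return poly
-- ===== SOURCE B (Python) =====
-- def int_to_poly(num, base, numof_coeffs):
--     """Return a list of coeffs of a polynomial encoded from an integer"""
--     num, base, numof_coeffs = int(num), int(base), int(numof_coeffs)
--     digits = []
--     for _ in range(numof_coeffs - 1):
--         num, r = divmod(num, base)
--         digits.append(r)
--     if num >= base:
--         raise ValueError(
--             f"Integer cannot fit in {numof_coeffs} slot coeffs"
--         )
--     return [num] + digits[::-1]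
-- ===== Notes on version B (the rewrite author's own statement) =====
-- stated objective: faster
-- what changed: A builds all powers base**i (MSB first) and divmods the running remainder by each huge power; B does numof_coeffs-1 small divmods by base itself (low digits first), keeps the final quotient as the top coefficient and reverses, avoiding any big-integer powers.
-- outside the precondition, e.g. on int_to_poly(-39, -2, 5): A returns [-3, -2, -2, -1, -1], B returns [-3, -1, 0, -1, -1]; on int_to_poly(-37, -2, 5): A returns [-3, -2, -2, -2, -1], B raises ValueError
import Mathlib
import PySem

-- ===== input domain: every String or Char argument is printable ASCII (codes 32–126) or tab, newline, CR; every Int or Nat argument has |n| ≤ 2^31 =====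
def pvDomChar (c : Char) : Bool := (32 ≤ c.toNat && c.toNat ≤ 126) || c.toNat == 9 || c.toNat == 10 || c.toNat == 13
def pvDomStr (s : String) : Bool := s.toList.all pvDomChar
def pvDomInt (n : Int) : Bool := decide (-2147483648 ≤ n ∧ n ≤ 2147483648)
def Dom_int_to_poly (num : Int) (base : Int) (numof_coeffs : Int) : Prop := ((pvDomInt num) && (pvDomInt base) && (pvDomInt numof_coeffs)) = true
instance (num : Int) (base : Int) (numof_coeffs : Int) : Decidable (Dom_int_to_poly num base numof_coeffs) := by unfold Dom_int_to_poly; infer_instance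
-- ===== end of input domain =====

-- B replaces A's MSB-first divmod chain by huge powers base**i with low-to-high divmods by base
-- itself plus one reverse: asymptotically faster (no big-integer powers), exact for base ≥ 1.


-- ===== PORT A =====
-- the generator `coeffs` (for pth in pds: coeff, num = divmod(num, pth); yield coeff), consumed by
-- list(...): a fold over pds carrying num; the yielded coeffs are accumulated front-on (so the fold
-- is tail-recursive) and reversed back into yield order afterwards
def pvStepA (st : List Int × Int) (pth : Int) : List Int × Int :=
  (PySem.Int.floordiv st.2 pth :: st.1, PySem.Int.mod st.2 pth)

def int_to_poly (num : Int) (base : Int) (numof_coeffs : Int) : List Int :=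
  -- pds = (base ** i for i in reversed(range(numof_coeffs)))
  let pds := ((PySem.List.pyRange 0 numof_coeffs 1).reverse).map (fun i => base ^ i.toNat)
  let poly := (pds.foldl pvStepA ([], num)).1.reverse
  match PySem.List.pyGet? poly 0 with
  | none => []                                  -- Python: IndexError (numof_coeffs ≤ 0); outside Pre_
  | some c => if c ≥ base then [] else poly     -- Python: ValueError when poly[0] >= base; outside Pre_

-- ===== PORT B =====
-- the loop `for _ in range(numof_coeffs - 1): num, r = divmod(num, base); digits.append(r)`:
-- a fold over the range carrying num; digits are accumulated front-on, so st.2 is digits[::-1]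
-- already and the final `[num] + digits[::-1]` is just num :: st.2
def pvStepB (b : Int) (st : Int × List Int) (_i : Int) : Int × List Int :=
  (PySem.Int.floordiv st.1 b, PySem.Int.mod st.1 b :: st.2)

def int_to_poly_alt (num : Int) (base : Int) (numof_coeffs : Int) : List Int :=
  let p := (PySem.List.pyRange 0 (numof_coeffs - 1) 1).foldl (pvStepB base) (num, [])
  if p.1 ≥ base then []                         -- Python: ValueError; outside Pre_
  else p.1 :: p.2

-- ===== PRECONDITION & SPEC =====
-- Pre_ excludes the inputs where A raises (IndexError for numof_coeffs < 1, ZeroDivisionError for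
-- base = 0 with numof_coeffs ≥ 2, ValueError when the integer does not fit, i.e. num ≥
-- base^numof_coeffs), and also base ≤ 0 with numof_coeffs ≥ 2, where A raises on almost all
-- inputs but does return on a few: there base-b digit encoding is ill-defined and A's chain of
-- divmods by mixed-sign powers is an accidental corner on which B's natural low-to-high loop
-- differs or raises (examples in the claim's cites); with numof_coeffs ≤ 2 any nonzero base is
-- admitted (there the two programs perform the same single divmod).
-- The fit clause in the second disjunct is, for every input in Dom_ (so |num| ≤ 2^31), EXACTLY
-- A's no-ValueError condition num < base^numof_coeffs — 'num < base' subsumes it since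
-- num < base ≤ base^k, and for base ≥ 2 with numof_coeffs ≥ 32 it holds since base^k ≥ 2^32 >
-- num; the disjunctive form only keeps the Decidable instance from evaluating astronomically
-- large powers, it admits and rejects the same inputs of Dom_.
def Pre_int_to_poly (num : Int) (base : Int) (numof_coeffs : Int) : Prop :=
  1 ≤ numof_coeffs ∧
    ((numof_coeffs = 1 ∧ num < base) ∨
     (numof_coeffs = 2 ∧ base ≠ 0 ∧ PySem.Int.floordiv num base < base) ∨
     (1 ≤ base ∧
       (num < base ∨ (2 ≤ base ∧ (32 ≤ numof_coeffs ∨ num < base ^ numof_coeffs.toNat)))))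
instance (num : Int) (base : Int) (numof_coeffs : Int) : Decidable (Pre_int_to_poly num base numof_coeffs) := by unfold Pre_int_to_poly; infer_instance

def pvWitness_int_to_poly : Int × Int × Int := (10, 3, 4)

def Spec_int_to_poly (num : Int) (base : Int) (numof_coeffs : Int) (out : List Int) : Prop := out = int_to_poly_alt num base numof_coeffs
instance (num : Int) (base : Int) (numof_coeffs : Int) (out : List Int) : Decidable (Spec_int_to_poly num base numof_coeffs out) := by unfold Spec_int_to_poly; infer_instance

-- ===== CLAIM (what is proved, stated in full; the proofs are below) =====
def Claim_equal_int_to_poly : Prop := ∀ (num : Int) (base : Int) (numof_coeffs : Int), Dom_int_to_poly num base numof_coeffs → Pre_int_to_poly num base numof_coeffs → Spec_int_to_poly num base numof_coeffs (int_to_poly num base numof_coeffs)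

-- ===== LEMMAS AND PROOFS =====

-- (n % b^(m+1)) / b^i = n / b^i - b^(m+1-i) * (n / b^(m+1))  for i ≤ m, 0 < b
lemma pv_emod_pow_ediv {b : Int} (hb : 0 < b) (n : Int) (i m : Nat) (him : i ≤ m) :
    (n % b ^ (m+1)) / b ^ i = n / b ^ i - b ^ (m+1-i) * (n / b ^ (m+1)) := by
  have hbi : (b : Int) ^ i ≠ 0 := (pow_pos hb i).ne'
  have hsplit : b ^ (m+1) = b ^ i * b ^ (m+1-i) := by
    rw [← pow_add]; congr 1; omega
  set q := n / b ^ (m+1) with hq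
  rw [Int.emod_def, ← hq]
  have key : n - b ^ (m+1) * q = n + b ^ i * (-(b ^ (m+1-i) * q)) := by
    rw [hsplit]; ring
  rw [key, Int.add_mul_ediv_left n _ hbi]; ring

lemma pv_top_digit {b : Int} (hb : 0 < b) (n : Int) (m : Nat) :
    (n % b ^ (m+1)) / b ^ m = n / b ^ m % b := by
  have h := pv_emod_pow_ediv hb n m m le_rfl
  have hm1 : m + 1 - m = 1 := by omega
  rw [h, hm1, pow_one, Int.emod_def]
  have hdd : n / b ^ m / b = n / b ^ (m+1) := by
    rw [Int.ediv_ediv_of_nonneg (pow_pos hb m).le, ← pow_succ]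
  rw [hdd]

lemma pv_low_digit {b : Int} (hb : 0 < b) (n : Int) (i m : Nat) (him : i < m) :
    (n % b ^ (m+1)) / b ^ i % b = n / b ^ i % b := by
  have h := pv_emod_pow_ediv hb n i m him.le
  have hsp : b ^ (m+1-i) = b * b ^ (m-i) := by
    rw [← pow_succ']; congr 1; omega
  rw [h, hsp]
  have key : n / b ^ i - b * b ^ (m-i) * (n / b ^ (m+1))
       = n / b ^ i + b * (-(b ^ (m-i) * (n / b ^ (m+1)))) := by ring
  rw [key, Int.add_mul_emod_self_left]

-- A's fold over [b^m, …, b^0]: the accumulated (reversed) coefficient list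
lemma pvFoldA_spec {b : Int} (hb : 0 < b) :
    ∀ (m : Nat) (n : Int) (acc : List Int),
      (((((List.range (m+1)).reverse).map (fun i => b ^ i)).foldl pvStepA (acc, n)).1 : List Int)
        = ((List.range m).map (fun i => n / b ^ i % b) ++ [n / b ^ m]) ++ acc := by
  intro m
  induction m with
  | zero => intro n acc; simp [pvStepA]
  | succ m ih =>
    intro n acc
    have hrev : (List.range (m+1+1)).reverse = (m+1) :: (List.range (m+1)).reverse := by
      rw [List.range_succ, List.reverse_append]; simp
    rw [hrev, List.map_cons, List.foldl_cons]
    show ((((List.range (m+1)).reverse).map (fun i => b ^ i)).foldl pvStepA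
      (pvStepA (acc, n) (b ^ (m+1)))).1 = _
    rw [show pvStepA (acc, n) (b ^ (m+1))
          = (n / b ^ (m+1) :: acc, n % b ^ (m+1)) by
        simp [pvStepA, PySem.Int.floordiv_eq_ediv_of_pos (pow_pos hb _),
          PySem.Int.mod_eq_emod_of_pos (pow_pos hb _)]]
    rw [ih]
    have hm : (List.range (m+1)).map (fun i => n / b ^ i % b)
        = (List.range m).map (fun i => n / b ^ i % b) ++ [n / b ^ m % b] := by
      rw [List.range_succ, List.map_append]; rfl
    have hcongr : (List.range m).map (fun i => (n % b ^ (m+1)) / b ^ i % b)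
        = (List.range m).map (fun i => n / b ^ i % b) := by
      refine List.map_congr_left ?_
      intro j hj
      exact pv_low_digit hb n j m (List.mem_range.mp hj)
    rw [hcongr, pv_top_digit hb n m, hm]
    simp

-- B's fold: after l.length divmods by b, the state is (n / b^len, reversed low digits ++ acc)
lemma pvFoldB_spec {b : Int} (hb : 0 < b) :
    ∀ (l : List Int) (n : Int) (acc : List Int),
      l.foldl (pvStepB b) (n, acc)
        = (n / b ^ l.length,
           ((List.range l.length).map (fun i => n / b ^ i % b)).reverse ++ acc) := by
  intro l
  induction l with
  | nil => intro n acc; simp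
  | cons x xs ih =>
    intro n acc
    rw [List.foldl_cons]
    show xs.foldl (pvStepB b) (pvStepB b (n, acc) x) = _
    rw [show pvStepB b (n, acc) x = (n / b, n % b :: acc) by
        simp [pvStepB, PySem.Int.floordiv_eq_ediv_of_pos hb,
          PySem.Int.mod_eq_emod_of_pos hb]]
    rw [ih]
    refine Prod.ext ?_ ?_
    · show n / b / b ^ xs.length = n / b ^ (xs.length + 1)
      rw [Int.ediv_ediv_of_nonneg hb.le, ← pow_succ']
    · show ((List.range xs.length).map (fun i => n / b / b ^ i % b)).reverse ++ (n % b :: acc)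
        = ((List.range (xs.length + 1)).map (fun i => n / b ^ i % b)).reverse ++ acc
      rw [List.range_succ_eq_map, List.map_cons, List.map_map]
      have hcongr : (List.range xs.length).map ((fun i => n / b ^ i % b) ∘ Nat.succ)
          = (List.range xs.length).map (fun i => n / b / b ^ i % b) := by
        refine List.map_congr_left ?_
        intro j _
        simp only [Function.comp]
        rw [Int.ediv_ediv_of_nonneg hb.le, ← pow_succ']
      rw [hcongr]
      simp

-- the pds list of port A is [b^K, …, b^0] for K + 1 = numof_coeffs
lemma pv_pds_eq (b k : Int) (hk : 1 ≤ k) :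
    ((PySem.List.pyRange 0 k 1).reverse).map (fun i => b ^ i.toNat)
      = ((List.range ((k-1).toNat + 1)).reverse).map (fun i => b ^ i) := by
  have hkt : (k - 0).toNat = (k-1).toNat + 1 := by omega
  rw [PySem.List.pyRange_one, ← List.map_reverse, List.map_map, hkt]
  refine List.map_congr_left ?_
  intro j _
  simp

-- ===== VERDICT (by name: the statement is the Claim_ definition above) =====
-- with one coefficient both programs are the identity encoding [num], for every base
lemma pv_one_coeff (num base : Int) (hnb : num < base) :
    int_to_poly num base 1 = int_to_poly_alt num base 1 := by
  have h1 : PySem.List.pyRange 0 1 1 = [0] := by decide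
  have h0 : PySem.List.pyRange 0 0 1 = [] := by decide
  simp [int_to_poly, int_to_poly_alt, h1, h0, pvStepA,
    PySem.Int.floordiv, PySem.Int.mod, Int.fdiv_one, PySem.List.pyGet?, PySem.List.pyIdx?,
    not_le.mpr hnb]

-- with two coefficients both programs are the same single divmod, for every nonzero base
lemma pv_two_coeffs (num base : Int) :
    int_to_poly num base 2 = int_to_poly_alt num base 2 := by
  have h2 : PySem.List.pyRange 0 2 1 = [0, 1] := by decide
  have h1 : PySem.List.pyRange 0 1 1 = [0] := by decide
  simp [int_to_poly, int_to_poly_alt, h2, h1, pvStepA, pvStepB,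
    PySem.Int.floordiv, PySem.Int.mod, Int.fdiv_one, PySem.List.pyGet?, PySem.List.pyIdx?]

theorem int_to_poly_spec : Claim_equal_int_to_poly := by
  intro num base k _hdom hpre
  obtain ⟨hk1, hcase⟩ := hpre
  rcases hcase with ⟨hk, hnb⟩ | ⟨hk, -, -⟩ | ⟨hb1, -⟩
  · subst hk
    exact pv_one_coeff num base hnb
  · subst hk
    exact pv_two_coeffs num base
  have hb : 0 < base := hb1
  simp only [Spec_int_to_poly, int_to_poly, int_to_poly_alt]
  rw [pv_pds_eq base k hk1, pvFoldA_spec hb, pvFoldB_spec hb,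
    PySem.List.length_pyRange_one]
  have hlen : (k - 1 - 0).toNat = (k - 1).toNat := by omega
  rw [hlen]
  simp [PySem.List.pyGet?, PySem.List.pyIdx?, List.reverse_append]
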